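-- pv_equiv track=rewrite | github.com/koushalvichare/Rantsmith_final | app/routes/ai_processing.py | calculate_sentiment_shift
-- ===== SOURCE A (Python) =====
-- def calculate_sentiment_shift(user_message, ai_response):
--     """Simple sentiment shift calculation"""
--     # This is a simplified version - in production, you'd use more sophisticated sentiment analysis
--     negative_words = ['sad', 'angry', 'frustrated', 'terrible', 'awful', 'hate', 'can\'t', 'won\'t', 'never']
--     positive_words = ['hope', 'better', 'good', 'great', 'love', 'can', 'will', 'possible', 'growth', 'strength']
--
--     user_negative = sum(1 for word in negative_words if word in user_message.lower())
--     user_positive = sum(1 for word in positive_words if word in user_message.lower())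
--
--     ai_negative = sum(1 for word in negative_words if word in ai_response.lower())
--     ai_positive = sum(1 for word in positive_words if word in ai_response.lower())
--
--     user_sentiment = user_positive - user_negative
--     ai_sentiment = ai_positive - ai_negative
--
--     sentiment_shift = ai_sentiment - user_sentiment
--
--     if sentiment_shift > 2:
--         return "significantly_more_positive"
--     elif sentiment_shift > 0:
--         return "more_positive"
--     elif sentiment_shift == 0:
--         return "neutral"
--     else:
--         return "maintained_tone"
-- ===== SOURCE B (Python) =====
-- NEGATIVE_WORDS = ['sad', 'angry', 'frustrated', 'terrible', 'awful', 'hate', "can't", "won't", 'never']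
-- POSITIVE_WORDS = ['hope', 'better', 'good', 'great', 'love', 'can', 'will', 'possible', 'growth', 'strength']
-- WEIGHTED_WORDS = [(w, -1) for w in NEGATIVE_WORDS] + [(w, 1) for w in POSITIVE_WORDS]
--
--
-- def _score(text):
--     """Single left-to-right scan: at each position, any still-unseen word that
--     starts there contributes its weight once and is dropped from the candidates."""
--     low = text.lower()
--     remaining = WEIGHTED_WORDS
--     score = 0
--     for i in range(len(low)):
--         score += sum(wt for w, wt in remaining if low.startswith(w, i))
--         remaining = [(w, wt) for w, wt in remaining if not low.startswith(w, i)]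
--     return score
--
--
-- def calculate_sentiment_shift(user_message, ai_response):
--     """Simple sentiment shift calculation"""
--     sentiment_shift = _score(ai_response) - _score(user_message)
--     if sentiment_shift > 2:
--         return "significantly_more_positive"
--     elif sentiment_shift > 0:
--         return "more_positive"
--     elif sentiment_shift == 0:
--         return "neutral"
--     else:
--         return "maintained_tone"
-- ===== Notes on version B (the rewrite author's own statement) =====
-- stated objective: alternative
-- what changed: A is word-driven (for each of the 19 words, run a full substring-membership test over each lowered message, four list passes); B is text-driven: one left-to-right scan over each lowered message's positions with a shrinking candidate list, adding a word's +-1 weight the first time it starts at the current position, then the same threshold classification.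
import Mathlib
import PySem

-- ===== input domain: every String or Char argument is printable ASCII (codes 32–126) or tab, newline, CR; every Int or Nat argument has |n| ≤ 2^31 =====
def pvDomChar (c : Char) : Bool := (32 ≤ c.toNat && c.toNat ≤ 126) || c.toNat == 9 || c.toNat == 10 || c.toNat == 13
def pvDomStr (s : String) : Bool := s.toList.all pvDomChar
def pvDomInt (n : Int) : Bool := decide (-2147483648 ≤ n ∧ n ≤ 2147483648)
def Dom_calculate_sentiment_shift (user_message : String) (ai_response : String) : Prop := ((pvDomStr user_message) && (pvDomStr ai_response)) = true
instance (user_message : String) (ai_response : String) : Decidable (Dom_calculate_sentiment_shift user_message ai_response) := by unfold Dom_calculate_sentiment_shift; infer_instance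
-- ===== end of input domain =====

-- B replaces A's word-driven substring membership counts with a text-driven single scan
-- over each lowered message's positions with a shrinking candidate list (objective: alternative).

-- ===== PORT A =====
def pvNegWords : List String :=
  ["sad", "angry", "frustrated", "terrible", "awful", "hate", "can't", "won't", "never"]
def pvPosWords : List String :=
  ["hope", "better", "good", "great", "love", "can", "will", "possible", "growth", "strength"]

def calculate_sentiment_shift (user_message : String) (ai_response : String) : String :=
  let user_negative : Int := pvNegWords.countP (fun w => PySem.Str.isIn w (PySem.Str.lower user_message))
  let user_positive : Int := pvPosWords.countP (fun w => PySem.Str.isIn w (PySem.Str.lower user_message))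
  let ai_negative : Int := pvNegWords.countP (fun w => PySem.Str.isIn w (PySem.Str.lower ai_response))
  let ai_positive : Int := pvPosWords.countP (fun w => PySem.Str.isIn w (PySem.Str.lower ai_response))
  let user_sentiment := user_positive - user_negative
  let ai_sentiment := ai_positive - ai_negative
  let sentiment_shift := ai_sentiment - user_sentiment
  if sentiment_shift > 2 then "significantly_more_positive"
  else if sentiment_shift > 0 then "more_positive"
  else if sentiment_shift = 0 then "neutral"
  else "maintained_tone"

-- ===== PORT B =====
def pvWeightedWords : List (String × Int) :=
  pvNegWords.map (fun w => (w, -1)) ++ pvPosWords.map (fun w => (w, 1))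

-- low.startswith(w, i) for 0 ≤ i (the loop indices): hand port, exact on 0 ≤ i since Python
-- clamps the start offset and a prefix test at offset i is a prefix test on the drop.
def pvStartsAt (low : List Char) (i : Int) (w : String) : Bool :=
  PySem.Chars.startswith (low.drop i.toNat) w.toList

-- the loop of _score, on the already-lowered code points
def pvScan (low : List Char) : List (String × Int) × Int :=
  (PySem.List.pyRange 0 low.length 1).foldl
    (fun (st : List (String × Int) × Int) i =>
      (st.1.filter (fun q => !pvStartsAt low i q.1),
       st.2 + ((st.1.filter (fun q => pvStartsAt low i q.1)).map Prod.snd).sum))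
    (pvWeightedWords, 0)

def pvScoreAlt (text : String) : Int :=
  (pvScan (PySem.Str.lower text).toList).2

def calculate_sentiment_shift_alt (user_message : String) (ai_response : String) : String :=
  let sentiment_shift := pvScoreAlt ai_response - pvScoreAlt user_message
  if sentiment_shift > 2 then "significantly_more_positive"
  else if sentiment_shift > 0 then "more_positive"
  else if sentiment_shift = 0 then "neutral"
  else "maintained_tone"

-- ===== PRECONDITION & SPEC =====
def Spec_calculate_sentiment_shift (user_message : String) (ai_response : String) (out : String) : Prop := out = calculate_sentiment_shift_alt user_message ai_response
instance (user_message : String) (ai_response : String) (out : String) : Decidable (Spec_calculate_sentiment_shift user_message ai_response out) := by unfold Spec_calculate_sentiment_shift; infer_instance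

-- ===== CLAIM =====
def Claim_equal_calculate_sentiment_shift : Prop := ∀ (user_message : String) (ai_response : String), Dom_calculate_sentiment_shift user_message ai_response → Spec_calculate_sentiment_shift user_message ai_response (calculate_sentiment_shift user_message ai_response)

-- ===== LEMMAS AND PROOFS =====
-- "word w starts at some position j < n of low"
def pvSeen (low : List Char) (n : Nat) (w : String) : Bool :=
  (List.range n).any (fun j => PySem.Chars.startswith (low.drop j) w.toList)

-- sum over a filter by (p ∨ q) splits into filter by p plus the newly matched (¬p ∧ q)
lemma pv_sum_filter_or (l : List (String × Int)) (p q : String → Bool) :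
    ((l.filter (fun x => p x.1 || q x.1)).map Prod.snd).sum
      = ((l.filter (fun x => p x.1)).map Prod.snd).sum
        + ((l.filter (fun x => !p x.1 && q x.1)).map Prod.snd).sum := by
  induction l with
  | nil => simp
  | cons x xs ih =>
    by_cases hp : p x.1 <;> by_cases hq : q x.1 <;> simp [hp, hq, ih] <;> ring

-- loop invariant: after scanning the first n positions, remaining = unseen words,
-- score = sum of the weights of the seen words
lemma pv_scan_invariant (low : List Char) (n : Nat) :
    ((List.range n).map (fun k => ((k : Nat) : Int))).foldl
      (fun (st : List (String × Int) × Int) i =>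
        (st.1.filter (fun q => !pvStartsAt low i q.1),
         st.2 + ((st.1.filter (fun q => pvStartsAt low i q.1)).map Prod.snd).sum))
      (pvWeightedWords, 0)
    = (pvWeightedWords.filter (fun q => !pvSeen low n q.1),
       ((pvWeightedWords.filter (fun q => pvSeen low n q.1)).map Prod.snd).sum) := by
  induction n with
  | zero => simp [pvSeen]
  | succ n ih =>
    rw [List.range_succ, List.map_append, List.foldl_append, ih]
    simp only [List.map_cons, List.map_nil, List.foldl_cons, List.foldl_nil]
    have hstart : ∀ w : String, pvStartsAt low ((n : Nat) : Int) w
        = PySem.Chars.startswith (low.drop n) w.toList := by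
      intro w; simp [pvStartsAt]
    have hseen : ∀ w : String, pvSeen low (n + 1) w
        = (pvSeen low n w || PySem.Chars.startswith (low.drop n) w.toList) := by
      intro w; simp [pvSeen, List.range_succ]
    simp only [Prod.mk.injEq]
    constructor
    · rw [List.filter_filter]
      apply List.filter_congr
      intro x _
      simp only [hseen, hstart, Bool.not_or]
      exact Bool.and_comm _ _
    · rw [List.filter_filter]
      have := pv_sum_filter_or pvWeightedWords (fun w => pvSeen low n w)
        (fun w => PySem.Chars.startswith (low.drop n) w.toList)
      rw [List.filter_congr (fun x _ => by simp [hseen] : ∀ x ∈ pvWeightedWords,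
            (pvSeen low (n+1) x.1) = (pvSeen low n x.1 || PySem.Chars.startswith (low.drop n) x.1.toList)),
          this]
      congr 1
      apply congrArg (fun l => (List.map Prod.snd l).sum)
      apply List.filter_congr
      intro x _
      simp only [hstart]
      exact Bool.and_comm _ _

-- for a nonempty word, "seen somewhere in the first len positions" IS Python's `w in low`
lemma pv_seen_eq_isIn (low : List Char) (w : String) (hw : w.toList ≠ []) :
    pvSeen low low.length w = PySem.Chars.isIn w.toList low := by
  by_cases h : PySem.Chars.isIn w.toList low
  · rw [h]
    rcases (PySem.Chars.exists_prefix_drop_iff_isIn w.toList low).2 h with ⟨j, hj⟩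
    have hjlt : j < low.length := by
      by_contra hge
      push Not at hge
      rw [List.drop_eq_nil_of_le hge] at hj
      exact hw (List.prefix_nil.mp hj)
    simp only [pvSeen, List.any_eq_true]
    exact ⟨j, List.mem_range.mpr hjlt, (PySem.Chars.startswith_iff _ _).mpr hj⟩
  · rw [Bool.eq_false_iff.mpr h]
    simp only [pvSeen, List.any_eq_false]
    intro j hj hsw
    exact h ((PySem.Chars.exists_prefix_drop_iff_isIn _ _).1
      ⟨j, (PySem.Chars.startswith_iff _ _).mp hsw⟩)

-- summing a constant weight c over the matching words of a list is c times the match count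
lemma pv_sum_filter_map_const (l : List String) (c : Int) (p : String → Bool) :
    (((l.map (fun w => (w, c))).filter (fun q => p q.1)).map Prod.snd).sum
      = c * (l.countP p : Int) := by
  induction l with
  | nil => simp
  | cons x xs ih =>
    by_cases h : p x
    · simp [h, ih]; ring
    · simp [h, ih]

-- the scan's score equals A's positive-count minus negative-count
lemma pv_score_eq (t : String) :
    pvScoreAlt t = (pvPosWords.countP (fun w => PySem.Str.isIn w (PySem.Str.lower t)) : Int)
              - (pvNegWords.countP (fun w => PySem.Str.isIn w (PySem.Str.lower t)) : Int) := by
  have hne : ∀ q ∈ pvWeightedWords, q.1.toList ≠ [] := by decide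
  unfold pvScoreAlt pvScan
  rw [PySem.List.pyRange_one]
  simp only [Int.sub_zero, Int.toNat_natCast, zero_add]
  have hc : ∀ q ∈ pvWeightedWords,
      pvSeen (PySem.Str.lower t).toList (PySem.Str.lower t).toList.length q.1
        = PySem.Str.isIn q.1 (PySem.Str.lower t) := by
    intro q hq
    rw [pv_seen_eq_isIn _ _ (hne q hq)]
    simp [PySem.Str.isIn]
  rw [pv_scan_invariant, List.filter_congr hc]
  simp only [pvWeightedWords, List.filter_append, List.map_append, List.sum_append]
  rw [pv_sum_filter_map_const pvNegWords (-1) (fun w => PySem.Str.isIn w (PySem.Str.lower t)),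
    pv_sum_filter_map_const pvPosWords 1 (fun w => PySem.Str.isIn w (PySem.Str.lower t))]
  ring

-- ===== VERDICT =====
theorem calculate_sentiment_shift_spec : Claim_equal_calculate_sentiment_shift := by
  intro u a _
  show calculate_sentiment_shift u a = calculate_sentiment_shift_alt u a
  unfold calculate_sentiment_shift calculate_sentiment_shift_alt
  simp only [pv_score_eq]
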